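-- pv_equiv track=rewrite | github.com/123owq/util | extract_v3.py | table_to_records
-- ===== SOURCE A (Python) =====
-- def table_to_records(table: list[list[str]]) -> list[dict]:
--     """첫 행 헤더 기준 dict 리스트 변환"""
--     if not table or len(table) < 2:
--         return []
--     headers = [h for h in table[0]]
--     records = []
--     for row in table[1:]:
--         record = {}
--         for h, v in zip(headers, row):
--             record[h if h else f"col_{len(record)}"] = v
--         records.append(record)
--     return records
-- ===== SOURCE B (Python) =====
-- def table_to_records(table: list[list[str]]) -> list[dict]:
--     """첫 행 헤더 기준 dict 리스트 변환"""
--     if not table or len(table) < 2: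
--         return []
--     keys = []
--     seen = set()
--     for h in table[0]:
--         k = h if h else f"col_{len(seen)}"
--         keys.append(k)
--         seen.add(k)
--     return [dict(zip(keys, row)) for row in table[1:]]
-- ===== Notes on version B (the rewrite author's own statement) =====
-- stated objective: alternative
-- what changed: Resolves the header keys once in a single pre-pass (a seen-set counts distinct keys so empty headers get col_<distinct-so-far>, matching A's per-row len(record)), then builds each record as dict(zip(keys, row)) instead of re-resolving keys inside every row's inner loop.
import Mathlib
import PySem

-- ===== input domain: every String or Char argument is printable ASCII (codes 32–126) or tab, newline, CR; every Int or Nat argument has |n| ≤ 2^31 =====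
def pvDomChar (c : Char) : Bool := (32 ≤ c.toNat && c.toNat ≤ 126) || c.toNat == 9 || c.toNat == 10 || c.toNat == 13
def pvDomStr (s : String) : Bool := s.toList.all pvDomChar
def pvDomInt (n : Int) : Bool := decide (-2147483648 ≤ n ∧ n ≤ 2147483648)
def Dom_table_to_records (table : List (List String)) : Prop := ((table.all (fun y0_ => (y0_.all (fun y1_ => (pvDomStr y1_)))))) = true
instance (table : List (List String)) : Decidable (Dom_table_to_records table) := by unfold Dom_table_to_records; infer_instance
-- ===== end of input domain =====

-- B resolves the header keys in one pre-pass (seen-set), then maps dict(zip(keys,row)) over the rows;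
-- alternative decomposition, same asymptotic cost. A = B on all inputs (A is total).


-- ===== PORT A =====
-- inner 'for h, v in zip(headers, row)' loop: record[h if h else f"col_{len(record)}"] = v
def tblRecStep (record : PySem.Dict String String) (hv : String × String) : PySem.Dict String String :=
  record.insert (if hv.1 ≠ "" then hv.1 else "col_" ++ PySem.Int.toStr (record.size : Int)) hv.2

def table_to_records (table : List (List String)) : List (List (String × String)) :=
  if table = [] ∨ table.length < 2 then []
  else
    let headers := table.headI.map (fun h => h)
    let records := (table.drop 1).foldl
      (fun records row =>
        let record := (headers.zip row).foldl tblRecStep PySem.Dict.empty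
        records ++ [record.items]) []
    records

-- ===== PORT B =====
-- the pre-pass over table[0]: keys.append(h if h else f"col_{len(seen)}"); seen.add(k)
def tblKeyStep (acc : List String × PySem.Set String) (h : String) : List String × PySem.Set String :=
  let k := if h ≠ "" then h else "col_" ++ PySem.Int.toStr (acc.2.length : Int)
  (acc.1 ++ [k], PySem.Set.add acc.2 k)

def table_to_records_alt (table : List (List String)) : List (List (String × String)) :=
  if table = [] ∨ table.length < 2 then []
  else
    let keys := (table.headI.foldl tblKeyStep ([], PySem.Set.empty)).1
    (table.drop 1).map (fun row => (PySem.Dict.ofList (keys.zip row)).items)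

-- ===== PRECONDITION & SPEC =====
def Spec_table_to_records (table : List (List String)) (out : List (List (String × String))) : Prop := out = table_to_records_alt table
instance (table : List (List String)) (out : List (List (String × String))) : Decidable (Spec_table_to_records table out) := by unfold Spec_table_to_records; infer_instance

-- ===== CLAIM (what is proved, stated in full; the proofs are below) =====
def Claim_equal_table_to_records : Prop := ∀ (table : List (List String)), Dom_table_to_records table → Spec_table_to_records table (table_to_records table)

-- ===== LEMMAS AND PROOFS =====

-- recursive form of B's key pre-pass, parametrised by the set of keys seen so far
def tblResolve (headers : List String) (seen : PySem.Set String) : List String :=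
  match headers with
  | [] => []
  | h :: hs =>
    let k := if h ≠ "" then h else "col_" ++ PySem.Int.toStr (seen.length : Int)
    k :: tblResolve hs (PySem.Set.add seen k)

lemma tblKeyFold_fst (headers : List String) (acc : List String) (seen : PySem.Set String) :
    (headers.foldl tblKeyStep (acc, seen)).1 = acc ++ tblResolve headers seen := by
  induction headers generalizing acc seen with
  | nil => simp [tblResolve]
  | cons h hs ih =>
    simp only [List.foldl_cons, tblKeyStep, tblResolve]
    rw [ih]
    simp

lemma dict_contains_eq_keys_contains (d : PySem.Dict String String) (k : String) :
    d.contains k = PySem.Set.contains d.keys k := by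
  have := PySem.Dict.contains_eq_decide_mem_keys d k
  simp [this, PySem.Set.contains]

lemma keys_length_eq_size (d : PySem.Dict String String) : d.keys.length = d.size := by
  simp [PySem.Dict.keys, PySem.Dict.size]

-- the per-row invariant: A's inner loop starting from rec equals inserting
-- (tblResolve headers rec.keys) zipped with the row
lemma row_loop_eq (headers row : List String) (rec : PySem.Dict String String) :
    (headers.zip row).foldl tblRecStep rec
      = ((tblResolve headers rec.keys).zip row).foldl (fun d p => d.insert p.1 p.2) rec := by
  induction headers generalizing row rec with
  | nil => simp [tblResolve]
  | cons h hs ih =>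
    cases row with
    | nil => simp [tblResolve]
    | cons v vs =>
      simp only [List.zip_cons_cons, List.foldl_cons, tblResolve, tblRecStep]
      rw [keys_length_eq_size]
      set k := if h ≠ "" then h else "col_" ++ PySem.Int.toStr (rec.size : Int) with hk
      have hkeys : (rec.insert k v).keys = PySem.Set.add rec.keys k := by
        rw [PySem.Set.add, ← dict_contains_eq_keys_contains]
        by_cases hc : rec.contains k
        · rw [PySem.Dict.keys_insert_of_contains rec v hc]; simp [hc]
        · simp only [Bool.not_eq_true] at hc
          rw [PySem.Dict.keys_insert_of_not_contains rec v hc]; simp [hc]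
      rw [ih vs (rec.insert k v), hkeys]

lemma record_eq (headers row : List String) :
    (headers.zip row).foldl tblRecStep PySem.Dict.empty
      = PySem.Dict.ofList ((tblResolve headers PySem.Set.empty).zip row) := by
  have h := row_loop_eq headers row PySem.Dict.empty
  have hk : (PySem.Dict.empty (κ := String) (ν := String)).keys = PySem.Set.empty := rfl
  rw [hk] at h
  rw [h]
  rfl

-- ===== VERDICT (by name: the statement is the Claim_ definition above) =====
theorem table_to_records_spec : Claim_equal_table_to_records := by
  intro table _
  unfold Spec_table_to_records
  simp only [table_to_records, table_to_records_alt]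
  split_ifs with hguard
  · rfl
  · rw [tblKeyFold_fst table.headI [] PySem.Set.empty, List.nil_append, List.map_id',
        PySem.List.foldl_append_singleton_eq_map, List.nil_append]
    apply List.map_congr_left
    intro row _
    rw [record_eq]
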